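-- pv_equiv track=rewrite | github.com/jeansabety/learning_python | mcb185.py | orfseq
-- ===== SOURCE A (Python) =====
-- def orfseq(seq):
-- #find ATG
-- 	for i in range(len(seq) -2): #all the starting positions we could possibly see
-- 		start = None
-- 		stop = None
-- 		if seq[i:i+3] == 'ATG':
-- 			start = i
-- 	#one you find an ATG, you have to go by triplets
-- 			for j in range(i, len(seq) -2, 3) : #starting at A, through the rest of the sequence, by 3s
-- 				codon = seq[j: j+3] #stop codon starts at j
-- 				if codon == 'TAA' or codon == 'TAG' or codon == 'TGA' :
-- 					stop = j
-- 					break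
-- 			if stop != None: yield seq[start:stop] #yield returns one at a time - doesnt create the whole list, does one at a time
-- ===== SOURCE B (Python) =====
-- def orfseq(seq):
--     # backward pass records, per position, the next in-frame stop; then one scan over ATGs
--     n = len(seq)
--     stops = ('TAA', 'TAG', 'TGA')
--     next_stop = {}
--     for j in range(n - 3, -1, -1):
--         if seq[j:j+3] in stops:
--             next_stop[j] = j
--         else:
--             next_stop[j] = next_stop.get(j + 3)
--     for i in range(n - 2):
--         if seq[i:i+3] == 'ATG':
--             s = next_stop.get(i)
--             if s is not None:
--                 yield seq[i:s]
-- ===== Notes on version B (the rewrite author's own statement) =====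
-- stated objective: alternative
-- what changed: Replaced A's per-ATG forward rescan for an in-frame stop codon by a single backward pass that records, for every position, the next in-frame stop in a dict, then one forward scan over ATGs with a lookup per ATG.
import Mathlib
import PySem

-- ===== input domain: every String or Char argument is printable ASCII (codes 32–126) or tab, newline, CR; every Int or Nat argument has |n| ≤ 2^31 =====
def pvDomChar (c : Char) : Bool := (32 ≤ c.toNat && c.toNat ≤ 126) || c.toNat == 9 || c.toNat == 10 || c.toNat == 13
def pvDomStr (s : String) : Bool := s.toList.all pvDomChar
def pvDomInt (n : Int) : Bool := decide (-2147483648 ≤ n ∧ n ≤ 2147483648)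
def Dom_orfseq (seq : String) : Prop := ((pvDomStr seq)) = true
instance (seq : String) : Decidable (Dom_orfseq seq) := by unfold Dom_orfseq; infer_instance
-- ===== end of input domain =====

-- B replaces A's per-ATG forward scan for an in-frame stop by one backward pass that
-- records, per position, the next in-frame stop (alternative algorithm, one pass).

-- ===== PORT A =====
-- inner 'for j in range(i, len(seq)-2, 3): … break' loop of A, as structural recursion
def pvFindStopA (cs : List Char) (j : Nat) : Option Nat :=
  if h : j + 2 < cs.length then
    let codon := PySem.List.slice cs (some (j : Int)) (some ((j : Int) + 3))
    if codon = ['T','A','A'] ∨ codon = ['T','A','G'] ∨ codon = ['T','G','A'] then some j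
    else pvFindStopA cs (j + 3)
  else none
termination_by cs.length - j
decreasing_by omega

def orfseq (seq : String) : List String :=
  let cs := seq.toList
  (List.range (cs.length - 2)).foldl
    (fun acc (i : Nat) =>
      if PySem.List.slice cs (some (i : Int)) (some ((i : Int) + 3)) = ['A','T','G'] then
        match pvFindStopA cs i with
        | some stop => acc ++ [String.ofList (PySem.List.slice cs (some (i : Int)) (some (stop : Int)))]
        | none => acc
      else acc) []

-- ===== PORT B =====
def pvStopsB : List (List Char) := [['T','A','A'], ['T','A','G'], ['T','G','A']]

-- backward pass: next_stop[j] = j if stop codon at j else next_stop.get(j+3)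
def pvNextStop (cs : List Char) : PySem.Dict Int (Option Int) :=
  (PySem.List.pyRange ((cs.length : Int) - 3) (-1) (-1)).foldl
    (fun d j =>
      if PySem.List.slice cs (some j) (some (j + 3)) ∈ pvStopsB then d.insert j (some j)
      else d.insert j (d.getD (j + 3) none))
    PySem.Dict.empty

def orfseq_alt (seq : String) : List String :=
  let cs := seq.toList
  let d := pvNextStop cs
  (List.range (cs.length - 2)).foldl
    (fun acc (i : Nat) =>
      if PySem.List.slice cs (some (i : Int)) (some ((i : Int) + 3)) = ['A','T','G'] then
        match d.getD (i : Int) none with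
        | some s => acc ++ [String.ofList (PySem.List.slice cs (some (i : Int)) (some s))]
        | none => acc
      else acc) []

-- ===== PRECONDITION & SPEC =====
def Spec_orfseq (seq : String) (out : List String) : Prop := out = orfseq_alt seq
instance (seq : String) (out : List String) : Decidable (Spec_orfseq seq out) := by unfold Spec_orfseq; infer_instance

-- ===== CLAIM (what is proved, stated in full; the proofs are below) =====
def Claim_equal_orfseq : Prop := ∀ (seq : String), Dom_orfseq seq → Spec_orfseq seq (orfseq seq)

-- ===== LEMMAS AND PROOFS =====

-- the value B's table holds at j: A's inner-scan result, cast to Int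
def pvSpecI (cs : List Char) (j : Int) : Option Int :=
  (pvFindStopA cs j.toNat).map (fun s => (s : Int))

theorem pvSpecI_step (cs : List Char) (t : Nat) (ht : (t : Int) ≤ (cs.length : Int) - 3) :
    pvSpecI cs (t : Int) =
      if PySem.List.slice cs (some (t : Int)) (some ((t : Int) + 3)) ∈ pvStopsB then some (t : Int)
      else pvSpecI cs ((t : Int) + 3) := by
  have hlen : t + 2 < cs.length := by omega
  have h3 : ((t : Int) + 3).toNat = t + 3 := by omega
  unfold pvSpecI
  rw [Int.toNat_natCast, h3, pvFindStopA, dif_pos hlen]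
  simp only [pvStopsB, List.mem_cons, List.not_mem_nil, or_false]
  split_ifs <;> simp

theorem pvSpecI_none (cs : List Char) (j : Int) (hj : (cs.length : Int) - 3 < j) :
    pvSpecI cs j = none := by
  unfold pvSpecI
  rw [pvFindStopA, dif_neg (by omega)]
  rfl

theorem pvStep_value (cs : List Char) (t : Nat) (d : PySem.Dict Int (Option Int))
    (ht : (t : Int) ≤ (cs.length : Int) - 3)
    (hd : ∀ j : Int, d.get? j =
      if (t : Int) + 1 ≤ j ∧ j ≤ (cs.length : Int) - 3 then some (pvSpecI cs j) else none) :
    (if PySem.List.slice cs (some (t : Int)) (some ((t : Int) + 3)) ∈ pvStopsB then some (t : Int)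
     else d.getD ((t : Int) + 3) none) = pvSpecI cs (t : Int) := by
  rw [pvSpecI_step cs t ht]
  split_ifs with h
  · rfl
  · rw [PySem.Dict.getD_eq_get?_getD, hd]
    by_cases h2 : (t : Int) + 3 ≤ (cs.length : Int) - 3
    · rw [if_pos ⟨by omega, h2⟩]
      rfl
    · rw [if_neg (by omega)]
      rw [pvSpecI_none cs _ (by omega)]
      rfl

theorem pvFold_inv (cs : List Char) : ∀ (t : Nat), (t : Int) ≤ (cs.length : Int) - 2 →
    ∀ (d : PySem.Dict Int (Option Int)),
    (∀ j : Int, d.get? j =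
      if (t : Int) ≤ j ∧ j ≤ (cs.length : Int) - 3 then some (pvSpecI cs j) else none) →
    ∀ j : Int,
      ((PySem.List.pyRange ((t : Int) - 1) (-1) (-1)).foldl
        (fun d j =>
          if PySem.List.slice cs (some j) (some (j + 3)) ∈ pvStopsB then d.insert j (some j)
          else d.insert j (d.getD (j + 3) none)) d).get? j =
      if 0 ≤ j ∧ j ≤ (cs.length : Int) - 3 then some (pvSpecI cs j) else none := by
  intro t
  induction t with
  | zero =>
    intro _ d hd j
    rw [PySem.List.pyRange_neg_one_eq_nil (by norm_num)]
    simpa using hd j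
  | succ t ih =>
    intro hle d hd j
    have hcast : ((t + 1 : Nat) : Int) - 1 = (t : Int) := by push_cast; ring
    rw [hcast, PySem.List.pyRange_neg_one_cons (by omega), List.foldl_cons]
    apply ih (by omega)
    intro j'
    have ht3 : (t : Int) ≤ (cs.length : Int) - 3 := by omega
    have hd' : ∀ j : Int, d.get? j =
        if (t : Int) + 1 ≤ j ∧ j ≤ (cs.length : Int) - 3 then some (pvSpecI cs j) else none := by
      intro j0
      rw [hd j0]
      norm_cast
    by_cases hst : PySem.List.slice cs (some (t : Int)) (some ((t : Int) + 3)) ∈ pvStopsB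
    · rw [if_pos hst, PySem.Dict.get?_insert]
      by_cases hj : j' = (t : Int)
      · subst hj
        rw [if_pos rfl, if_pos ⟨le_refl _, ht3⟩]
        have := pvStep_value cs t d ht3 hd'
        rw [if_pos hst] at this
        rw [this]
      · rw [if_neg hj, hd' j']
        congr 1
        simp only [eq_iff_iff]
        constructor <;> intro h <;> exact ⟨by omega, h.2⟩
    · rw [if_neg hst, PySem.Dict.get?_insert]
      by_cases hj : j' = (t : Int)
      · subst hj
        rw [if_pos rfl, if_pos ⟨le_refl _, ht3⟩]
        have := pvStep_value cs t d ht3 hd'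
        rw [if_neg hst] at this
        rw [this]
      · rw [if_neg hj, hd' j']
        congr 1
        simp only [eq_iff_iff]
        constructor <;> intro h <;> exact ⟨by omega, h.2⟩

theorem pvNextStop_get (cs : List Char) (j : Int) :
    (pvNextStop cs).get? j =
      if 0 ≤ j ∧ j ≤ (cs.length : Int) - 3 then some (pvSpecI cs j) else none := by
  unfold pvNextStop
  by_cases hn : 2 ≤ cs.length
  · have h := pvFold_inv cs (cs.length - 2) (by omega) PySem.Dict.empty
      (fun j0 => by rw [if_neg (by omega)]; exact PySem.Dict.get?_empty j0) j
    rw [show ((cs.length - 2 : Nat) : Int) - 1 = (cs.length : Int) - 3 from by omega] at h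
    exact h
  · rw [PySem.List.pyRange_neg_one_eq_nil (by omega)]
    rw [if_neg (by omega)]
    exact PySem.Dict.get?_empty j

-- ===== VERDICT (by name: the statement is the Claim_ definition above) =====
theorem orfseq_spec : Claim_equal_orfseq := by
  unfold Claim_equal_orfseq Spec_orfseq
  intro seq _
  unfold orfseq orfseq_alt
  simp only []
  apply PySem.List.foldl_congr_mem'
  intro i hi acc
  have hi' : i < seq.toList.length - 2 := List.mem_range.mp hi
  by_cases hATG : PySem.List.slice seq.toList (some (i : Int)) (some ((i : Int) + 3)) = ['A','T','G']
  · rw [if_pos hATG, if_pos hATG]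
    have hget : (pvNextStop seq.toList).getD (i : Int) none = pvSpecI seq.toList (i : Int) := by
      rw [PySem.Dict.getD_eq_get?_getD, pvNextStop_get]
      rw [if_pos ⟨by omega, by omega⟩]
      rfl
    rw [hget]
    unfold pvSpecI
    rw [Int.toNat_natCast]
    cases hfs : pvFindStopA seq.toList i with
    | none => simp
    | some s => simp
  · rw [if_neg hATG, if_neg hATG]
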